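-- pv_equiv track=rewrite | github.com/jcolinpatrick/kryptos | scripts/crib_analysis/e_solve_06_crib_drag.py | check_periodicity
-- ===== SOURCE A (Python) =====
-- def check_periodicity(keys_dict, period):
--     """Check if key values are consistent with a given period."""
--     by_residue = {}
--     for pos, kval in keys_dict.items():
--         res = pos % period
--         if res in by_residue:
--             if by_residue[res] != kval:
--                 return False
--         else:
--             by_residue[res] = kval
--     return True
-- ===== SOURCE B (Python) =====
-- def check_periodicity(keys_dict, period):
--     """Check if key values are consistent with a given period."""
--     # Brute force: compare every pair of entries directly; consistent iff no
--     # two positions in the same residue class carry different key values.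
--     items = list(keys_dict.items())
--     return all(v1 == v2
--                for i, (p1, v1) in enumerate(items)
--                for (p2, v2) in items[i + 1:]
--                if p1 % period == p2 % period)
-- ===== Notes on version B (the rewrite author's own statement) =====
-- stated objective: alternative
-- what changed: Drops the residue dict entirely: B brute-force compares every pair of entries and demands equal values whenever two positions fall in the same residue class, instead of A's single pass that stores one value per residue and early-returns on conflict.
import Mathlib
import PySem

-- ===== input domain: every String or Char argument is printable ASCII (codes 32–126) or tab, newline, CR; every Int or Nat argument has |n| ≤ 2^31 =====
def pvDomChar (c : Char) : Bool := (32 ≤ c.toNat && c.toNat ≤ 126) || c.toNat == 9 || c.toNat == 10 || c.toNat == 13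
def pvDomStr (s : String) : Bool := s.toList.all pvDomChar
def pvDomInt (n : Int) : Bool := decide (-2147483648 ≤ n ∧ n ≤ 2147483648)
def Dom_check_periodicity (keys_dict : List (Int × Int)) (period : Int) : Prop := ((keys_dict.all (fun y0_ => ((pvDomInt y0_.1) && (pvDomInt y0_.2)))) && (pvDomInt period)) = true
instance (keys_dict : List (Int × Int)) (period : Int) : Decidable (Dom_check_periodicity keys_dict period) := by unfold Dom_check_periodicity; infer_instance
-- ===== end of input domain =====

-- B drops A's residue dict entirely and brute-force compares every pair of entries;
-- equivalence of the RETURN value on Pre_ (period ≠ 0 unless the dict is empty).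

-- ===== PORT A =====
-- the for-loop over keys_dict.items() with its early 'return False'
def cpLoopA : List (Int × Int) → PySem.Dict Int Int → Int → Bool
  | [], _, _ => true
  | (pos, kval) :: rest, by_residue, period =>
    let res := PySem.Int.mod pos period
    match by_residue.get? res with
    | some v => if v ≠ kval then false else cpLoopA rest by_residue period
    | none => cpLoopA rest (by_residue.insert res kval) period

def check_periodicity (keys_dict : List (Int × Int)) (period : Int) : Bool :=
  cpLoopA keys_dict PySem.Dict.empty period

-- ===== PORT B =====
-- all(v1 == v2 for i,(p1,v1) in enumerate(items) for (p2,v2) in items[i+1:] if p1%period == p2%period):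
-- for each entry, compare it against every later entry with the same residue
def cpPairs : Int → List (Int × Int) → Bool
  | _, [] => true
  | period, (p1, v1) :: rest =>
    (rest.all (fun e =>
      if PySem.Int.mod p1 period == PySem.Int.mod e.1 period then v1 == e.2 else true))
    && cpPairs period rest

def check_periodicity_alt (keys_dict : List (Int × Int)) (period : Int) : Bool :=
  cpPairs period keys_dict

-- ===== PRECONDITION & SPEC =====
-- Pre_ excludes the inputs where Python A raises ZeroDivisionError:
-- a nonempty keys_dict with period == 0.
def Pre_check_periodicity (keys_dict : List (Int × Int)) (period : Int) : Prop :=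
  keys_dict = [] ∨ period ≠ 0
instance (keys_dict : List (Int × Int)) (period : Int) : Decidable (Pre_check_periodicity keys_dict period) := by unfold Pre_check_periodicity; infer_instance
def pvWitness_check_periodicity : (List (Int × Int)) × Int := ([(0, 1), (5, 1), (7, 2)], 5)

def Spec_check_periodicity (keys_dict : List (Int × Int)) (period : Int) (out : Bool) : Prop := out = check_periodicity_alt keys_dict period
instance (keys_dict : List (Int × Int)) (period : Int) (out : Bool) : Decidable (Spec_check_periodicity keys_dict period out) := by unfold Spec_check_periodicity; infer_instance

-- ===== CLAIM (what is proved, stated in full; the proofs are below) =====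
def Claim_equal_check_periodicity : Prop := ∀ (keys_dict : List (Int × Int)) (period : Int), Dom_check_periodicity keys_dict period → Pre_check_periodicity keys_dict period → Spec_check_periodicity keys_dict period (check_periodicity keys_dict period)

-- ===== LEMMAS AND PROOFS =====

-- "entry e is consistent with the value A has stored for its residue (if any)"
def dOK (period : Int) (d : PySem.Dict Int Int) (e : Int × Int) : Bool :=
  match d.get? (PySem.Int.mod e.1 period) with
  | some w => w == e.2
  | none => true

lemma all_and (l : List (Int × Int)) (f g : Int × Int → Bool) :
    l.all (fun e => f e && g e) = (l.all f && l.all g) := by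
  induction l with
  | nil => rfl
  | cons a t ih =>
    simp only [List.all_cons, ih]
    cases f a <;> cases g a <;> cases t.all f <;> cases t.all g <;> rfl

lemma all_congr (l : List (Int × Int)) (f g : Int × Int → Bool)
    (h : ∀ e ∈ l, f e = g e) : l.all f = l.all g := by
  induction l with
  | nil => rfl
  | cons a t ih =>
    simp only [List.all_cons, h a (List.mem_cons_self), ih (fun e he => h e (List.mem_cons_of_mem a he))]

-- main invariant: A's loop from state d equals the pairwise check plus consistency with d
lemma main_inv (rest : List (Int × Int)) (period : Int) :
    ∀ d : PySem.Dict Int Int,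
      cpLoopA rest d period = (cpPairs period rest && rest.all (dOK period d)) := by
  induction rest with
  | nil => intro d; rfl
  | cons pr tl ih =>
    intro d
    obtain ⟨p1, v1⟩ := pr
    cases hget : d.get? (PySem.Int.mod p1 period) with
    | some w =>
      have hdhead : dOK period d (p1, v1) = (w == v1) := by
        simp [dOK, hget]
      simp only [cpLoopA, cpPairs, List.all_cons, hget, hdhead]
      by_cases hwv : w = v1
      · subst hwv
        simp only [ne_eq, not_true_eq_false, if_false, ih d, beq_self_eq_true, Bool.true_and]
        -- pointwise: consistency with d forces the pair condition against (p1, v1)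
        have hpt : ∀ e ∈ tl, dOK period d e = true →
            (if PySem.Int.mod p1 period == PySem.Int.mod e.1 period then w == e.2 else true) = true := by
          intro e _ he
          split_ifs with hres
          · rw [beq_iff_eq] at hres
            simpa [dOK, ← hres, hget] using he
          · rfl
        cases hA : tl.all (dOK period d) <;>
          cases hP : tl.all (fun e => if PySem.Int.mod p1 period == PySem.Int.mod e.1 period then w == e.2 else true) <;>
          cases hC : cpPairs period tl <;> try rfl
        all_goals
          (exfalso
           rw [List.all_eq_false] at hP
           obtain ⟨e, he, hfe⟩ := hP
           exact hfe (hpt e he (List.all_eq_true.mp hA e he)))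
      · have : (w == v1) = false := by simpa using hwv
        simp [ne_eq, hwv, this]
    | none =>
      have hdhead : dOK period d (p1, v1) = true := by simp [dOK, hget]
      simp only [cpLoopA, cpPairs, List.all_cons, hget, hdhead,
        ih (d.insert (PySem.Int.mod p1 period) v1), Bool.true_and]
      have hpt : ∀ e ∈ tl, dOK period (d.insert (PySem.Int.mod p1 period) v1) e =
          ((if PySem.Int.mod p1 period == PySem.Int.mod e.1 period then v1 == e.2 else true)
            && dOK period d e) := by
        intro e _
        simp only [dOK, PySem.Dict.get?_insert]
        by_cases hres : PySem.Int.mod e.1 period = PySem.Int.mod p1 period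
        · have hres' : (PySem.Int.mod p1 period == PySem.Int.mod e.1 period) = true := by
            simp [hres]
          simp [hres, hres', hget]
        · have hres' : (PySem.Int.mod p1 period == PySem.Int.mod e.1 period) = false := by
            simp [Ne.symm hres]
          simp [hres, hres']
      rw [all_congr tl _ _ hpt, all_and]
      cases cpPairs period tl <;> cases htl : tl.all (dOK period d) <;>
        cases hp : tl.all (fun e => if PySem.Int.mod p1 period == PySem.Int.mod e.1 period then v1 == e.2 else true) <;> rfl

-- ===== VERDICT (by name: the statements are the Claim_ definitions above) =====
theorem check_periodicity_spec : Claim_equal_check_periodicity := by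
  intro keys_dict period _ _
  unfold Spec_check_periodicity check_periodicity check_periodicity_alt
  rw [main_inv keys_dict period PySem.Dict.empty]
  have : keys_dict.all (dOK period PySem.Dict.empty) = true := by
    rw [List.all_eq_true]
    intro e _
    simp [dOK, PySem.Dict.get?_empty]
  simp [this]
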